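-- pv_equiv track=rewrite | github.com/srihariprasad-r/leet-code | P1725.Number_of_rectangles.py | countGoodRectangles
-- ===== SOURCE A (Python) =====
-- def countGoodRectangles(rectangles):
--     """
--     :type rectangles: List[List[int]]
--     :rtype: int
--     """
--     res = []
--     largest = - float('inf')
--     for i in range(len(rectangles)):
--         length, width = rectangles[i][0], rectangles[i][1]
--         minarea = min(length, width)
--         if minarea > largest: largest = minarea
--         res.append(minarea)
--
--     return len([x for x in res if x == largest])
-- ===== SOURCE B (Python) =====
-- def countGoodRectangles(rectangles):
--     best = None
--     count = 0
--     for rect in rectangles: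
--         m = min(rect[0], rect[1])
--         if best is None or m > best:
--             best = m
--             count = 1
--         elif m == best:
--             count += 1
--     return count
-- ===== Notes on version B (the rewrite author's own statement) =====
-- stated objective: simpler
-- what changed: Single pass with running best/count accumulators instead of building the full list of min-sides and rescanning it; the intermediate res list disappears.
import Mathlib
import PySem

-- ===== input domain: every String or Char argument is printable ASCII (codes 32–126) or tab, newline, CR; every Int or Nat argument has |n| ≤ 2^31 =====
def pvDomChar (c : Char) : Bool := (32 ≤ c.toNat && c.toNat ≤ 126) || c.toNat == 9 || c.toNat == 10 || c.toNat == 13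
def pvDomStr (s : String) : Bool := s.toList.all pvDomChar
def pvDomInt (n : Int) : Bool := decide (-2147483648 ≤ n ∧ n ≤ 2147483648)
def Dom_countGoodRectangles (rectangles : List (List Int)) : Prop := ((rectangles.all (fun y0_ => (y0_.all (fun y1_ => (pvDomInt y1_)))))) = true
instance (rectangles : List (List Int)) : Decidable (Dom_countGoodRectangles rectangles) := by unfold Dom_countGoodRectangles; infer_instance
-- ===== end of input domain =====

-- B replaces A's build-the-list-of-min-sides-then-rescan with a single pass keeping a running
-- best/count pair, so the intermediate res list disappears (simpler). -inf is modelled as Option.none.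

-- ===== PORT A =====
-- A's loop: accumulates res (list of min sides) and largest (none = -float('inf')).
def cgrLoopA : List (List Int) → List Int → Option Int → List Int × Option Int
  | [], res, largest => (res, largest)
  | r :: rs, res, largest =>
      let length := (PySem.List.pyGet? r 0).getD 0   -- Pre_ guarantees the index is in range
      let width := (PySem.List.pyGet? r 1).getD 0
      let minarea := min length width
      let largest' := if (match largest with | none => true | some l => minarea > l)
                      then some minarea else largest
      cgrLoopA rs (res ++ [minarea]) largest'

def countGoodRectangles (rectangles : List (List Int)) : Int :=
  let p := cgrLoopA rectangles [] none
  let res := p.1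
  let largest := p.2
  -- len([x for x in res if x == largest]); nothing equals -inf
  ((res.filter (fun x => match largest with | none => false | some l => x == l)).length : Int)

-- ===== PORT B =====
def cgrLoopB : List (List Int) → Option Int → Int → Int
  | [], _, count => count
  | r :: rs, best, count =>
      let m := min ((PySem.List.pyGet? r 0).getD 0) ((PySem.List.pyGet? r 1).getD 0)
      match best with
      | none => cgrLoopB rs (some m) 1
      | some b =>
          if m > b then cgrLoopB rs (some m) 1
          else if m == b then cgrLoopB rs (some b) (count + 1)
          else cgrLoopB rs (some b) count

def countGoodRectangles_alt (rectangles : List (List Int)) : Int :=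
  cgrLoopB rectangles none 0

-- ===== PRECONDITION & SPEC =====
-- Pre_: every rectangle has at least two entries; otherwise Python A raises IndexError.
def Pre_countGoodRectangles (rectangles : List (List Int)) : Prop :=
  ∀ r ∈ rectangles, 2 ≤ r.length
instance (rectangles : List (List Int)) : Decidable (Pre_countGoodRectangles rectangles) := by
  unfold Pre_countGoodRectangles; infer_instance
def pvWitness_countGoodRectangles : List (List Int) := [[1, 2], [3, 4], [2, 2]]

def Spec_countGoodRectangles (rectangles : List (List Int)) (out : Int) : Prop := out = countGoodRectangles_alt rectangles
instance (rectangles : List (List Int)) (out : Int) : Decidable (Spec_countGoodRectangles rectangles out) := by unfold Spec_countGoodRectangles; infer_instance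

-- ===== CLAIM (what is proved, stated in full; the proofs are below) =====
def Claim_equal_countGoodRectangles : Prop := ∀ (rectangles : List (List Int)), Dom_countGoodRectangles rectangles → Pre_countGoodRectangles rectangles → Spec_countGoodRectangles rectangles (countGoodRectangles rectangles)

-- ===== LEMMAS AND PROOFS =====

-- Finish step of A: count the elements of res equal to the final largest.
def cgrFinish (p : List Int × Option Int) : Int :=
  ((p.1.filter (fun x => match p.2, x with | none, _ => false | some l, x => x == l)).length : Int)

lemma cgrFilter_count (res : List Int) (v : Int) :
    (res.filter (fun x => x == v)).length = res.count v := by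
  induction res with
  | nil => simp
  | cons a res ih =>
      by_cases h : a = v
      · simp [h, ih]
      · simp [List.filter_cons, h, ih]

-- Main invariant: if (res, largest, cnt) satisfy the loop invariant, finishing A's loop
-- from this state equals B's loop from (largest, cnt).
lemma cgr_invariant (rs : List (List Int)) :
    ∀ (res : List Int) (largest : Option Int) (cnt : Int),
      (largest = none → res = [] ∧ cnt = 0) →
      (∀ v, largest = some v → (∀ x ∈ res, x ≤ v) ∧ cnt = (res.count v : Int)) →
      cgrFinish (cgrLoopA rs res largest) = cgrLoopB rs largest cnt := by
  induction rs with
  | nil =>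
      intro res largest cnt hnone hsome
      cases largest with
      | none =>
          obtain ⟨h1, h2⟩ := hnone rfl
          simp [cgrLoopA, cgrLoopB, cgrFinish, h1, h2]
      | some v =>
          obtain ⟨-, h2⟩ := hsome v rfl
          simp [cgrLoopA, cgrLoopB, cgrFinish, cgrFilter_count, h2]
  | cons r rs ih =>
      intro res largest cnt hnone hsome
      simp only [cgrLoopA, cgrLoopB]
      set m := min ((PySem.List.pyGet? r 0).getD 0) ((PySem.List.pyGet? r 1).getD 0) with hm
      cases largest with
      | none =>
          obtain ⟨h1, -⟩ := hnone rfl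
          simp only [h1]
          apply ih
          · intro h; simp at h
          · intro v hv
            injection hv with hv; subst hv
            constructor
            · intro x hx; simp at hx; omega
            · simp
      | some b =>
          obtain ⟨hle, hcnt⟩ := hsome b rfl
          by_cases hgt : m > b
          · simp only [hgt, if_pos]
            apply ih
            · intro h; simp at h
            · intro v hv
              injection hv with hv; subst hv
              constructor
              · intro x hx
                rcases List.mem_append.mp hx with h | h
                · exact le_trans (hle x h) (le_of_lt hgt)
                · simp at h; omega
              · have : res.count m = 0 := by
                  rw [List.count_eq_zero]
                  intro hmem
                  exact absurd (hle m hmem) (by omega)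
                simp [List.count_append, this]
          · have hif : (if decide (m > b) = true then some m else some b) = some b := by
              simp [hgt]
            simp only [hif]
            rw [if_neg hgt]
            by_cases heq : m = b
            · have : (m == b) = true := by simp [heq]
              simp only [this, if_true]
              apply ih
              · intro h; simp at h
              · intro v hv
                injection hv with hv; subst hv
                constructor
                · intro x hx
                  rcases List.mem_append.mp hx with h | h
                  · exact hle x h
                  · simp at h; omega
                · simp [List.count_append, heq, hcnt]
            · have : (m == b) = false := by simp [heq]
              simp only [this, if_false, Bool.false_eq_true]
              apply ih
              · intro h; simp at h
              · intro v hv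
                injection hv with hv; subst hv
                constructor
                · intro x hx
                  rcases List.mem_append.mp hx with h | h
                  · exact hle x h
                  · simp at h
                    subst h
                    by_contra hc
                    exact hgt (by omega)
                · have : res.count m = res.count m := rfl
                  simp [List.count_append, heq, hcnt]

-- ===== VERDICT (by name: the statement is the Claim_ definition above) =====
theorem countGoodRectangles_spec : Claim_equal_countGoodRectangles := by
  intro rectangles _ _
  unfold Spec_countGoodRectangles countGoodRectangles countGoodRectangles_alt
  have h := cgr_invariant rectangles [] none 0
    (fun _ => ⟨rfl, rfl⟩) (fun v hv => by simp at hv)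
  simpa [cgrFinish] using h
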